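-- pv_equiv track=rewrite | github.com/enitefall88/Leetcode_Problems | hash_tables.py | hash_prime
-- ===== SOURCE A (Python) =====
-- def hash_prime(string):
--     a = "a"
--     b = "b"
--     c = "c"
--     d = 7
--     c = 11
--     g = "g"
--     sum = 0
--     for letter in string:
--         if letter == "a":
--             sum += 1
--         elif letter == "b":
--             sum += 13
--         elif letter == "g":
--             sum += 17
--     return sum % 10
-- ===== SOURCE B (Python) =====
-- # Divide-and-conquer: recursively split the string, sum reduced weights (mod 10) at each combine.
-- WEIGHTS = {'a': 1, 'b': 3, 'g': 7}
--
-- def _hsum(s, lo, hi):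
--     if hi - lo == 0:
--         return 0
--     if hi - lo == 1:
--         return WEIGHTS.get(s[lo], 0)
--     mid = (lo + hi) // 2
--     return (_hsum(s, lo, mid) + _hsum(s, mid, hi)) % 10
--
-- def hash_prime(string):
--     return _hsum(string, 0, len(string))
-- ===== Notes on version B (the rewrite author's own statement) =====
-- stated objective: alternative
-- what changed: Replaces A's left-to-right branching accumulation loop with an index-based divide-and-conquer recursion: split the range in half, score single characters from a weight table with weights reduced mod 10 (1,3,7 instead of 1,13,17), and combine the halves taking mod 10 at every merge.
import Mathlib
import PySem

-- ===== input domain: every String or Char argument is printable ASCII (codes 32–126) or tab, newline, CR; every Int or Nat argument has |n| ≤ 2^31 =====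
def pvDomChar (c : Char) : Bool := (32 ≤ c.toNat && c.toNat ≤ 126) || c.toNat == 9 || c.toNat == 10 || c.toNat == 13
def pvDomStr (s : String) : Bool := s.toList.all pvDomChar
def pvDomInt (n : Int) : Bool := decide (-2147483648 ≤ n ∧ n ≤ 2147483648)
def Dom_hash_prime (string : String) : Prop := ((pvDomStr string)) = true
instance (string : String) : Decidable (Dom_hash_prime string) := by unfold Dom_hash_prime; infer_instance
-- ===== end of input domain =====

-- B re-implements A by divide-and-conquer over index ranges with mod-10-reduced weights; alternative structure, same cost.

-- ===== PORT A =====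
-- A: branching per-character loop accumulating a weighted sum, then % 10.
def hash_prime (string : String) : Int :=
  let a := "a"
  let b := "b"
  let c := "c"
  let d := (7 : Int)
  let c := (11 : Int)
  let g := "g"
  let sum : Int :=
    string.toList.foldl (fun sum letter =>
      if letter = 'a' then sum + 1
      else if letter = 'b' then sum + 13
      else if letter = 'g' then sum + 17
      else sum) 0
  PySem.Int.mod sum 10

-- ===== PORT B =====
-- B: weight table with weights already reduced mod 10.
def WEIGHTS : PySem.Dict Char Int := PySem.Dict.ofList [('a', 1), ('b', 3), ('g', 7)]

-- _hsum: divide-and-conquer over the index range [lo, hi); indices are nonnegative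
-- in every call (0 ≤ lo ≤ hi ≤ len), so they are ported as Nat; (lo+hi)/2 on Nat equals
-- Python's (lo+hi)//2 here. s[lo] is ported by PySem.Str.pyGet? (none is unreachable).
-- The fuel argument (called with fuel = hi - lo, which only shrinks) is a pure
-- totality guard making the recursion structural; its 0-branch is unreachable.
def hsumGo (s : String) (fuel lo hi : Nat) : Int :=
  if hi - lo = 0 then 0
  else if hi - lo = 1 then
    match PySem.Str.pyGet? s (lo : Int) with
    | some c => WEIGHTS.getD c 0
    | none => 0
  else
    match fuel with
    | 0 => 0
    | fuel + 1 =>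
      let mid := (lo + hi) / 2
      PySem.Int.mod (hsumGo s fuel lo mid + hsumGo s fuel mid hi) 10

def hash_prime_alt (string : String) : Int :=
  hsumGo string string.toList.length 0 string.toList.length

-- ===== PRECONDITION & SPEC =====
def Spec_hash_prime (string : String) (out : Int) : Prop := out = hash_prime_alt string
instance (string : String) (out : Int) : Decidable (Spec_hash_prime string out) := by unfold Spec_hash_prime; infer_instance

-- ===== CLAIM (what is proved, stated in full; the proofs are below) =====
def Claim_equal_hash_prime : Prop := ∀ (string : String), Dom_hash_prime string → Spec_hash_prime string (hash_prime string)

-- ===== LEMMAS AND PROOFS =====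
-- A's per-character weight.
def wA (c : Char) : Int := if c = 'a' then 1 else if c = 'b' then 13 else if c = 'g' then 17 else 0
-- B's per-character weight (reduced mod 10).
def wB (c : Char) : Int := if c = 'a' then 1 else if c = 'b' then 3 else if c = 'g' then 7 else 0

theorem weights_getD (c : Char) : WEIGHTS.getD c 0 = wB c := by
  by_cases h1 : c = 'a'
  · subst h1; decide
  · by_cases h2 : c = 'b'
    · subst h2; decide
    · by_cases h3 : c = 'g'
      · subst h3; decide
      · simp [WEIGHTS, PySem.Dict.ofList, PySem.Dict.update, PySem.Dict.getD_insert,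
              wB, h1, h2, h3]

theorem hash_prime_foldl (l : List Char) (s : Int) :
    l.foldl (fun sum letter =>
      if letter = 'a' then sum + 1
      else if letter = 'b' then sum + 13
      else if letter = 'g' then sum + 17
      else sum) s = s + (l.map wA).sum := by
  induction l generalizing s with
  | nil => simp
  | cons x xs ih =>
    simp only [List.foldl_cons, List.map_cons, List.sum_cons, ih, wA]
    split_ifs <;> ring

theorem wA_wB_mod (l : List Char) : (l.map wA).sum % 10 = (l.map wB).sum % 10 := by
  induction l with
  | nil => rfl
  | cons x xs ih =>
    simp only [List.map_cons, List.sum_cons]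
    have hx : wA x = wB x ∨ wA x = wB x + 10 := by
      unfold wA wB; split_ifs <;> simp
    rcases hx with h | h <;> rw [h] <;> omega

theorem hsum_eq (s : String) (fuel lo hi : Nat) (hle : lo ≤ hi) (hlen : hi ≤ s.toList.length)
    (hfuel : hi - lo ≤ fuel) :
    hsumGo s fuel lo hi = (((s.toList.drop lo).take (hi - lo)).map wB).sum % 10 := by
  induction fuel generalizing lo hi with
  | zero =>
    rw [hsumGo]
    have h0 : hi - lo = 0 := by omega
    simp [h0]
  | succ n ih =>
    by_cases h0 : hi - lo = 0
    · rw [hsumGo]; simp [h0]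
    · by_cases h1 : hi - lo = 1
      · have hlt : lo < s.toList.length := by omega
        have hget : PySem.Str.pyGet? s (lo : Int) = some (s.toList[lo]'hlt) := by
          simp [PySem.Str.pyGet?_eq, PySem.List.pyGet?_natCast, hlt]
        have hseg : (s.toList.drop lo).take (hi - lo) = [s.toList[lo]'hlt] := by
          rw [h1, List.take_one]
          simp [List.head?_drop, List.getElem?_eq_getElem hlt]
        rw [hsumGo, if_neg h0, if_pos h1, hget, hseg]
        show WEIGHTS.getD (s.toList[lo]'hlt) 0 = _
        rw [weights_getD]
        simp only [List.map_cons, List.map_nil, List.sum_cons, List.sum_nil, add_zero]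
        have hw : wB (s.toList[lo]'hlt) = 0 ∨ wB (s.toList[lo]'hlt) = 1 ∨
               wB (s.toList[lo]'hlt) = 3 ∨ wB (s.toList[lo]'hlt) = 7 := by
          unfold wB; split_ifs <;> simp
        omega
      · rw [hsumGo, if_neg h0, if_neg h1]
        show PySem.Int.mod (hsumGo s n lo ((lo + hi) / 2) + hsumGo s n ((lo + hi) / 2) hi) 10 = _
        have hmid1 : lo ≤ (lo + hi) / 2 := by omega
        have hmid2 : (lo + hi) / 2 ≤ hi := by omega
        rw [ih lo ((lo + hi) / 2) hmid1 (le_trans hmid2 hlen) (by omega),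
            ih ((lo + hi) / 2) hi hmid2 hlen (by omega),
            PySem.Int.mod_eq_emod_of_pos (by norm_num)]
        have hseg : (s.toList.drop lo).take (hi - lo)
            = (s.toList.drop lo).take ((lo + hi) / 2 - lo)
              ++ (s.toList.drop ((lo + hi) / 2)).take (hi - (lo + hi) / 2) := by
          have h : hi - lo = ((lo + hi) / 2 - lo) + (hi - (lo + hi) / 2) := by omega
          have e1 : lo + ((lo + hi) / 2 - lo) = (lo + hi) / 2 := by omega
          rw [h, List.take_add, List.drop_drop, e1]
        rw [hseg, List.map_append, List.sum_append]
        omega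

-- ===== VERDICT (by name: the statement is the Claim_ definition above) =====
theorem hash_prime_spec : Claim_equal_hash_prime := by
  intro string _
  unfold Spec_hash_prime hash_prime hash_prime_alt
  rw [hash_prime_foldl, hsum_eq string string.toList.length 0 string.toList.length (Nat.zero_le _) le_rfl (by omega)]
  simp only [List.drop_zero, Nat.sub_zero, List.take_length, zero_add]
  rw [PySem.Int.mod_eq_emod_of_pos (by norm_num)]
  exact wA_wB_mod string.toList
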